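-- pv_equiv track=rewrite | github.com/FHegardt/AdventOfCode | AoC2023/AoC/solution13.py | find_duplicates_indices
-- ===== SOURCE A (Python) =====
-- def find_duplicates_indices(lst):
--     seen = {}
--     duplicate_indices = set()
--
--     for i, sublist in enumerate(lst):
--         tuple_sublist = tuple(sublist)
--
--         if tuple_sublist in seen:
--
--             duplicate_indices.add(i)
--             duplicate_indices.add(seen[tuple_sublist])
--         else:
--             seen[tuple_sublist] = i
--
--
--     return sorted(list(duplicate_indices))
-- ===== SOURCE B (Python) =====
-- def find_duplicates_indices(lst):
--     # Group all indices by row in one pass, then keep the groups of size >= 2.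
--     groups = {}
--     for i, sublist in enumerate(lst):
--         groups.setdefault(tuple(sublist), []).append(i)
--     result = []
--     for indices in groups.values():
--         if 2 <= len(indices):
--             result.extend(indices)
--     return sorted(result)
-- ===== Notes on version B (the rewrite author's own statement) =====
-- stated objective: simpler
-- what changed: A interleaves a seen-first-index map with a running duplicate set and per-element membership branching; B first builds a complete row->indices grouping, then collects the indices of every group of size >= 2 and sorts.
import Mathlib
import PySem

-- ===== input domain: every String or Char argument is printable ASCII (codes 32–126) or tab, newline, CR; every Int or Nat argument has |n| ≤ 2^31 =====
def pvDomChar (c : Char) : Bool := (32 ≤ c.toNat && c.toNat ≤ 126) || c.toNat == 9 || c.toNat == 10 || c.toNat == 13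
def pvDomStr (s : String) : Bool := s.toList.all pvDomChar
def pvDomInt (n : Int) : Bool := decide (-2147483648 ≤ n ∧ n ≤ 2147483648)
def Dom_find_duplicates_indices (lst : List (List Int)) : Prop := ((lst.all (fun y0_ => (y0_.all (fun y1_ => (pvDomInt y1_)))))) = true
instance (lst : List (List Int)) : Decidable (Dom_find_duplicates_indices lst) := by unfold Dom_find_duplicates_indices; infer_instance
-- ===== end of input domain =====

-- B replaces A's interleaved seen-map + duplicate-set loop by a one-pass row→indices grouping
-- followed by a filter of the groups of size ≥ 2 (objective: simpler decomposition, same cost).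

-- ===== PORT A =====
-- seen : dict mapping row to first index; duplicate_indices : set of Int.
-- `seen[tuple_sublist]` is ported as `getD … 0`: it is only reached under `contains`, where
-- Python's lookup returns the stored value, so the default is never used.
-- Python sorts `list(duplicate_indices)` (hash iteration order); since the elements are
-- distinct, sorting yields the same list as sorting the insertion-ordered distinct list.
def find_duplicates_indices (lst : List (List Int)) : List Int :=
  let st := (PySem.List.enumerate lst).foldl
    (fun (st : PySem.Dict (List Int) Int × PySem.Set Int) p =>
      if st.1.contains p.2 then
        (st.1, (st.2.add p.1).add (st.1.getD p.2 0))
      else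
        (st.1.insert p.2 p.1, st.2))
    (PySem.Dict.empty, PySem.Set.empty)
  PySem.List.sorted st.2 (fun x => x)

-- ===== PORT B =====
-- groups : dict mapping row to the list of ALL its indices (setdefault(…,[]).append(i) =
-- modify with default []); then one pass over the values keeps groups of size ≥ 2.
def find_duplicates_indices_alt (lst : List (List Int)) : List Int :=
  let groups := (PySem.List.enumerate lst).foldl
    (fun (d : PySem.Dict (List Int) (List Int)) p => d.modify p.2 [] (fun v => v ++ [p.1]))
    PySem.Dict.empty
  let result := groups.values.foldl
    (fun acc g => if 2 ≤ g.length then acc ++ g else acc) []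
  PySem.List.sorted result (fun x => x)

-- ===== PRECONDITION & SPEC =====
def Spec_find_duplicates_indices (lst : List (List Int)) (out : List Int) : Prop := out = find_duplicates_indices_alt lst
instance (lst : List (List Int)) (out : List Int) : Decidable (Spec_find_duplicates_indices lst out) := by unfold Spec_find_duplicates_indices; infer_instance

-- ===== CLAIM (what is proved, stated in full; the proofs are below) =====
def Claim_equal_find_duplicates_indices : Prop := ∀ (lst : List (List Int)), Dom_find_duplicates_indices lst → Spec_find_duplicates_indices lst (find_duplicates_indices lst)

-- ===== LEMMAS AND PROOFS =====

-- A's loop body and initial state, named for the proofs (definitionally the port's lambda).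
def aF : (PySem.Dict (List Int) Int × PySem.Set Int) → (Int × List Int) → (PySem.Dict (List Int) Int × PySem.Set Int) :=
  fun st p =>
    if st.1.contains p.2 then
      (st.1, (st.2.add p.1).add (st.1.getD p.2 0))
    else
      (st.1.insert p.2 p.1, st.2)

def aInit : PySem.Dict (List Int) Int × PySem.Set Int := (PySem.Dict.empty, PySem.Set.empty)

-- "x is the index of a row occurring at least twice in ps"
def DupAt (ps : List (Int × List Int)) (x : Int) : Prop :=
  ∃ p ∈ ps, p.1 = x ∧ 2 ≤ ps.countP (fun q => q.2 == p.2)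

-- the group of indices of row r
def bG (ps : List (Int × List Int)) (r : List Int) : List Int :=
  (ps.filter (fun q => q.2 == r)).map (fun p => p.1)

lemma two_le_length_of_mem_ne {α : Type} {l : List α} {a b : α}
    (ha : a ∈ l) (hb : b ∈ l) (hne : a ≠ b) : 2 ≤ l.length := by
  match l with
  | [] => simp at ha
  | [c] => simp at ha hb; exact absurd (ha.trans hb.symm) hne
  | _ :: _ :: _ => simp [List.length]

lemma two_le_countP_of_mem_ne {α : Type} {l : List α} {p : α → Bool} {a b : α}
    (ha : a ∈ l) (hb : b ∈ l) (hpa : p a = true) (hpb : p b = true) (hne : a ≠ b) :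
    2 ≤ l.countP p := by
  rw [List.countP_eq_length_filter]
  exact two_le_length_of_mem_ne (List.mem_filter.2 ⟨ha, hpa⟩) (List.mem_filter.2 ⟨hb, hpb⟩) hne

lemma aInv (ps : List (Int × List Int)) :
    (∀ r, ((ps.foldl aF aInit).1).get? r = ((ps.find? (fun p => p.2 == r)).map (fun p => p.1)))
    ∧ (∀ x, x ∈ (ps.foldl aF aInit).2 ↔ DupAt ps x) := by
  induction ps using List.reverseRecOn with
  | nil => constructor
           · intro r; simp [aInit, PySem.Dict.get?_empty]
           · intro x; simp [aInit, PySem.Set.empty, DupAt]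
  | append_singleton ps p ih =>
    obtain ⟨h1, h2⟩ := ih
    rw [List.foldl_append]
    simp only [List.foldl_cons, List.foldl_nil]
    set st := ps.foldl aF aInit with hst
    by_cases hc : st.1.contains p.2
    · -- p.2 already seen: there is a first occurrence p0 ∈ ps
      have hsome : (st.1.get? p.2).isSome := by
        rw [← PySem.Dict.contains_eq_isSome_get?]; exact hc
      rw [h1 p.2] at hsome
      obtain ⟨p0, hp0⟩ : ∃ p0, ps.find? (fun q => q.2 == p.2) = some p0 := by
        cases hfind : ps.find? (fun q => q.2 == p.2) with
        | none => rw [hfind] at hsome; simp at hsome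
        | some p0 => exact ⟨p0, rfl⟩
      have hp0mem : p0 ∈ ps := List.mem_of_find?_eq_some hp0
      have hp0row : p0.2 = p.2 := by
        have := List.find?_some hp0; simpa using this
      have hcount1 : 1 ≤ ps.countP (fun q => q.2 == p.2) :=
        List.countP_pos_iff.2 ⟨p0, hp0mem, by simp [hp0row]⟩
      have hgetD : st.1.getD p.2 0 = p0.1 := by
        show (st.1.get? p.2).getD 0 = p0.1
        rw [h1 p.2, hp0]; rfl
      have haF : aF st p = (st.1, (st.2.add p.1).add p0.1) := by
        simp [aF, hc, hgetD]
      rw [haF]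
      constructor
      · -- seen unchanged; find? over ps ++ [p] agrees
        intro r
        rw [List.find?_append, h1 r]
        by_cases hr : p.2 = r
        · subst hr; rw [hp0]; rfl
        · have hnone1 : List.find? (fun q => q.2 == r) [p] = none := by simp [hr]
          rw [hnone1, Option.or_none]
      · intro x
        rw [PySem.Set.mem_add, PySem.Set.mem_add, h2 x]
        constructor
        · rintro ((hx | hx) | hx)
          · obtain ⟨q, hqm, hqx, hqc⟩ := hx
            exact ⟨q, List.mem_append_left _ hqm, hqx,
              le_trans hqc (by rw [List.countP_append]; omega)⟩
          · -- x = p.1 : the new element is a duplicate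
            refine ⟨p, List.mem_append_right _ (by simp), hx.symm, ?_⟩
            rw [List.countP_append]
            have : List.countP (fun q => q.2 == p.2) [p] = 1 := by simp
            omega
          · refine ⟨p0, List.mem_append_left _ hp0mem, hx.symm, ?_⟩
            simp only [hp0row]
            rw [List.countP_append]
            have : List.countP (fun q => q.2 == p.2) [p] = 1 := by simp
            omega
        · rintro ⟨q, hqm, hqx, hqc⟩
          rcases List.mem_append.1 hqm with hq | hq
          · by_cases hold : 2 ≤ ps.countP (fun r => r.2 == q.2)
            · exact Or.inl (Or.inl ⟨q, hq, hqx, hold⟩)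
            · -- q's row occurs once in ps, so the new element must share it: q = p0
              rw [List.countP_append] at hqc
              have hle1 : List.countP (fun r => r.2 == q.2) [p] ≤ 1 :=
                le_trans List.countP_le_length (by simp)
              have hrow : p.2 = q.2 := by
                by_contra hne
                have : List.countP (fun r => r.2 == q.2) [p] = 0 := by simp [hne]
                omega
              by_cases hq0 : q = p0
              · subst hq0; exact Or.inr hqx.symm
              · exfalso
                apply hold
                exact two_le_countP_of_mem_ne hq hp0mem (by simp) (by simp [hp0row, hrow]) hq0
          · have : q = p := by simpa using hq
            subst this
            exact Or.inl (Or.inr hqx.symm)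
    · -- fresh row
      have hnone : ps.find? (fun q => q.2 == p.2) = none := by
        have : (st.1.get? p.2).isSome = false := by
          rw [← PySem.Dict.contains_eq_isSome_get?]; simpa using hc
        rw [h1 p.2] at this
        cases hfind : ps.find? (fun q => q.2 == p.2) with
        | none => rfl
        | some q => rw [hfind] at this; simp at this
      have hzero : ps.countP (fun q => q.2 == p.2) = 0 := by
        rw [List.countP_eq_zero]
        intro q hq hpq
        have := List.find?_eq_none.1 hnone q hq
        exact this hpq
      have haF : aF st p = (st.1.insert p.2 p.1, st.2) := by simp [aF, hc]
      rw [haF]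
      constructor
      · intro r
        show (st.1.insert p.2 p.1).get? r = _
        rw [List.find?_append]
        by_cases hr : r = p.2
        · subst hr
          rw [PySem.Dict.get?_insert_self, hnone]
          simp
        · have hins : (st.1.insert p.2 p.1).get? r = st.1.get? r := by simp [pysem, hr]
          rw [hins, h1 r]
          have hr' : ¬ p.2 = r := fun hh => hr hh.symm
          have hnone1 : List.find? (fun q => q.2 == r) [p] = none := by simp [hr']
          rw [hnone1, Option.or_none]
      · intro x
        rw [h2 x]
        constructor
        · rintro ⟨q, hq, hqx, hqc⟩
          refine ⟨q, List.mem_append_left _ hq, hqx, ?_⟩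
          rw [List.countP_append]; omega
        · rintro ⟨q, hqm, hqx, hqc⟩
          rcases List.mem_append.1 hqm with hq | hq
          · refine ⟨q, hq, hqx, ?_⟩
            rw [List.countP_append] at hqc
            by_cases hrow : p.2 = q.2
            · exfalso
              have : ps.countP (fun r => r.2 == q.2) = 0 := by rw [← hrow]; exact hzero
              have hle : List.countP (fun r => r.2 == q.2) [p] ≤ 1 :=
                le_trans List.countP_le_length (by simp)
              omega
            · have : List.countP (fun r => r.2 == q.2) [p] = 0 := by simp [hrow]
              omega
          · exfalso
            have hqp : q = p := by simpa using hq
            subst hqp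
            rw [List.countP_append] at hqc
            have hle : List.countP (fun r => r.2 == q.2) [q] ≤ 1 :=
              le_trans List.countP_le_length (by simp)
            rw [hzero] at hqc
            omega


lemma aNodup (ps : List (Int × List Int)) (st : PySem.Dict (List Int) Int × PySem.Set Int)
    (h : st.2.Nodup) : ((ps.foldl aF st).2).Nodup := by
  induction ps generalizing st with
  | nil => exact h
  | cons p ps ih =>
    apply ih
    unfold aF
    split
    · exact PySem.Set.nodup_add _ _ (PySem.Set.nodup_add _ _ h)
    · exact h

-- enumerate: indices are ≥ the start and pairwise distinct
lemma enum_fst_ge (lst : List (List Int)) (s : Int) :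
    ∀ p ∈ PySem.List.enumerate lst s, s ≤ p.1 := by
  induction lst generalizing s with
  | nil => intro p hp; simp [PySem.List.enumerate] at hp
  | cons x xs ih =>
    intro p hp
    rw [PySem.List.enumerate_cons] at hp
    rcases List.mem_cons.1 hp with hp | hp
    · subst hp; omega
    · have := ih (s + 1) p hp; omega

lemma enum_fst_nodup (lst : List (List Int)) (s : Int) :
    ((PySem.List.enumerate lst s).map (fun p => p.1)).Nodup := by
  induction lst generalizing s with
  | nil => simp [PySem.List.enumerate]
  | cons x xs ih =>
    rw [PySem.List.enumerate_cons]
    simp only [List.map_cons, List.nodup_cons]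
    refine ⟨?_, ih (s + 1)⟩
    intro hmem
    obtain ⟨p, hp, hps⟩ := List.mem_map.1 hmem
    have := enum_fst_ge xs (s + 1) p hp
    omega

lemma enum_inj (lst : List (List Int)) {p q : Int × List Int}
    (hp : p ∈ PySem.List.enumerate lst 0) (hq : q ∈ PySem.List.enumerate lst 0)
    (h : p.1 = q.1) : p = q :=
  List.inj_on_of_nodup_map (enum_fst_nodup lst 0) hp hq h


-- B's groups dict: getD and keys
lemma bGroups_getD (ps : List (Int × List Int)) (r : List Int) :
    ((ps.foldl (fun (d : PySem.Dict (List Int) (List Int)) p => d.modify p.2 [] (fun v => v ++ [p.1]))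
      PySem.Dict.empty).getD r []) = bG ps r := by
  have h : ps.foldl (fun (d : PySem.Dict (List Int) (List Int)) p => d.modify p.2 [] (fun v => v ++ [p.1]))
      PySem.Dict.empty
      = (ps.map Prod.swap).foldl (fun d p => d.modify p.1 [] (fun v => v ++ [p.2])) PySem.Dict.empty := by
    rw [List.foldl_map]
    rfl
  rw [h, PySem.Dict.getD_foldl_modify_append]
  simp [bG, List.filter_map, List.map_map, PySem.Dict.getD, PySem.Dict.get?_empty]
  rfl

lemma bKeys_mem (ps : List (Int × List Int)) (r : List Int) :
    r ∈ (ps.foldl (fun (d : PySem.Dict (List Int) (List Int)) p => d.modify p.2 [] (fun v => v ++ [p.1]))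
      PySem.Dict.empty).keys ↔ r ∈ ps.map (fun p => p.2) := by
  rw [PySem.Dict.keys_foldl_modify_key ps (fun p => p.2) [] (fun _ p v => v ++ [p.1]) PySem.Dict.empty]
  rw [PySem.Dict.keys_empty]
  rw [PySem.Set.mem_update]
  simp

lemma bKeys_nodup (ps : List (Int × List Int)) :
    ((ps.foldl (fun (d : PySem.Dict (List Int) (List Int)) p => d.modify p.2 [] (fun v => v ++ [p.1]))
      PySem.Dict.empty).keys).Nodup := by
  apply PySem.Dict.nodup_keys_foldl_modify_key ps (fun p => p.2) [] (fun _ p v => v ++ [p.1])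
  rw [PySem.Dict.keys_empty]; exact List.nodup_nil

-- B's filter pass, rewritten as a flatMap for the proofs
lemma bResult_eq (vs : List (List Int)) :
    vs.foldl (fun acc g => if 2 ≤ g.length then acc ++ g else acc) ([] : List Int)
      = vs.flatMap (fun g => if 2 ≤ g.length then g else []) := by
  have h : (fun (acc : List Int) (g : List Int) => if 2 ≤ g.length then acc ++ g else acc)
      = (fun acc g => acc ++ (if 2 ≤ g.length then g else [])) := by
    funext acc g; split <;> simp
  rw [h, PySem.List.foldl_append_eq_flatMap]
  rfl

lemma length_bG (ps : List (Int × List Int)) (r : List Int) :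
    (bG ps r).length = ps.countP (fun q => q.2 == r) := by
  simp [bG, List.countP_eq_length_filter]

lemma mem_bG {ps : List (Int × List Int)} {r : List Int} {x : Int} :
    x ∈ bG ps r ↔ ∃ p ∈ ps, p.2 = r ∧ p.1 = x := by
  simp only [bG, List.mem_map, List.mem_filter]
  constructor
  · rintro ⟨p, ⟨hp, hpr⟩, hx⟩
    exact ⟨p, hp, by simpa using hpr, hx⟩
  · rintro ⟨p, hp, hpr, hx⟩
    exact ⟨p, ⟨hp, by simp [hpr]⟩, hx⟩

lemma nodup_bG (lst : List (List Int)) (r : List Int) : (bG (PySem.List.enumerate lst 0) r).Nodup := by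
  apply List.Nodup.sublist _ (enum_fst_nodup lst 0)
  exact List.Sublist.map _ List.filter_sublist

-- the pre-sort list of B, characterized
lemma memB (lst : List (List Int)) (x : Int) :
    x ∈ ((PySem.List.enumerate lst).foldl
        (fun (d : PySem.Dict (List Int) (List Int)) p => d.modify p.2 [] (fun v => v ++ [p.1]))
        PySem.Dict.empty).values.foldl
        (fun acc g => if 2 ≤ g.length then acc ++ g else acc) ([] : List Int)
      ↔ DupAt (PySem.List.enumerate lst 0) x := by
  set l := PySem.List.enumerate lst 0 with hl
  set groups := l.foldl
      (fun (d : PySem.Dict (List Int) (List Int)) p => d.modify p.2 [] (fun v => v ++ [p.1]))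
      PySem.Dict.empty with hg
  rw [bResult_eq, PySem.Dict.values_eq_map_keys groups (bKeys_nodup l) []]
  simp only [List.flatMap_map, List.mem_flatMap]
  constructor
  · rintro ⟨r, hr, hx⟩
    rw [hg, bGroups_getD] at hx
    by_cases hlen : 2 ≤ (bG l r).length
    · rw [if_pos hlen] at hx
      obtain ⟨p, hp, hpr, hpx⟩ := mem_bG.1 hx
      refine ⟨p, hp, hpx, ?_⟩
      rw [length_bG] at hlen
      rw [hpr]
      exact hlen
    · rw [if_neg hlen] at hx; simp at hx
  · rintro ⟨p, hp, hpx, hcount⟩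
    refine ⟨p.2, ?_, ?_⟩
    · exact (bKeys_mem l p.2).2 (List.mem_map.2 ⟨p, hp, rfl⟩)
    · rw [hg, bGroups_getD]
      rw [if_pos (by rw [length_bG]; exact hcount)]
      exact mem_bG.2 ⟨p, hp, rfl, hpx⟩

lemma nodupB (lst : List (List Int)) :
    (((PySem.List.enumerate lst).foldl
        (fun (d : PySem.Dict (List Int) (List Int)) p => d.modify p.2 [] (fun v => v ++ [p.1]))
        PySem.Dict.empty).values.foldl
        (fun acc g => if 2 ≤ g.length then acc ++ g else acc) ([] : List Int)).Nodup := by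
  set l := PySem.List.enumerate lst 0 with hl
  set groups := l.foldl
      (fun (d : PySem.Dict (List Int) (List Int)) p => d.modify p.2 [] (fun v => v ++ [p.1]))
      PySem.Dict.empty with hg
  rw [bResult_eq, PySem.Dict.values_eq_map_keys groups (bKeys_nodup l) []]
  rw [List.flatMap_map]
  rw [List.nodup_flatMap]
  constructor
  · intro r _
    rw [hg, bGroups_getD]
    split
    · exact nodup_bG lst r
    · exact List.nodup_nil
  · refine List.Pairwise.imp ?_ (bKeys_nodup l)
    intro r r' hne
    rw [Function.onFun]
    rw [hg, bGroups_getD, bGroups_getD]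
    intro x hx hx'
    have hxr : x ∈ bG l r := by revert hx; split <;> intro hx <;> simp_all
    have hxr' : x ∈ bG l r' := by revert hx'; split <;> intro hx' <;> simp_all
    obtain ⟨p, hp, hpr, hpx⟩ := mem_bG.1 hxr
    obtain ⟨q, hq, hqr, hqx⟩ := mem_bG.1 hxr'
    have : p = q := enum_inj lst hp hq (hpx.trans hqx.symm)
    exact hne (hpr.symm.trans (this ▸ hqr))

-- ===== VERDICT (by name: the statement is the Claim_ definition above) =====
theorem find_duplicates_indices_spec : Claim_equal_find_duplicates_indices := by
  unfold Claim_equal_find_duplicates_indices Spec_find_duplicates_indices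
  intro lst _
  show PySem.List.sorted ((PySem.List.enumerate lst).foldl aF aInit).2 (fun x => x)
      = PySem.List.sorted (((PySem.List.enumerate lst).foldl
          (fun (d : PySem.Dict (List Int) (List Int)) p => d.modify p.2 [] (fun v => v ++ [p.1]))
          PySem.Dict.empty).values.foldl
          (fun acc g => if 2 ≤ g.length then acc ++ g else acc) ([] : List Int)) (fun x => x)
  set preA := ((PySem.List.enumerate lst).foldl aF aInit).2 with hpa
  set preB := (((PySem.List.enumerate lst).foldl
      (fun (d : PySem.Dict (List Int) (List Int)) p => d.modify p.2 [] (fun v => v ++ [p.1]))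
      PySem.Dict.empty).values.foldl
      (fun acc g => if 2 ≤ g.length then acc ++ g else acc) ([] : List Int)) with hpb
  have nA : preA.Nodup := aNodup _ aInit List.nodup_nil
  have nB : preB.Nodup := nodupB lst
  have hmem : ∀ x, x ∈ preA ↔ x ∈ preB := by
    intro x
    rw [(aInv (PySem.List.enumerate lst 0)).2 x, memB lst x]
  have hperm : preA.Perm preB := (List.perm_ext_iff_of_nodup nA nB).2 hmem
  have h1 : (PySem.List.sorted preA (fun x => x)).Perm preA :=
    PySem.List.sorted_perm preA (fun x => x) false
  have hns : (PySem.List.sorted preA (fun x => x)).Nodup := h1.symm.nodup nA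
  have hle : (PySem.List.sorted preA (fun x => x)).Pairwise (fun a b => a ≤ b) :=
    PySem.List.sorted_pairwise preA (fun x => x)
  have hlt : (PySem.List.sorted preA (fun x => x)).Pairwise (fun a b => a < b) := by
    have hne : (PySem.List.sorted preA (fun x => x)).Pairwise (fun a b => a ≠ b) := hns
    refine List.Pairwise.imp ?_ (hle.and hne)
    rintro a b ⟨hab, hab'⟩
    exact lt_of_le_of_ne hab hab'
  exact (PySem.List.sorted_eq_of_perm_of_pairwise_lt preB (PySem.List.sorted preA (fun x => x))
    (fun x => x) (h1.trans hperm) hlt).symm
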